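-- pv_equiv track=rewrite | github.com/dahnyol/python-exercises-boot-dev | ch8_loops/criticalHit.py | calculate_flurry_crit
-- ===== SOURCE A (Python) =====
-- def calculate_flurry_crit(num_attacks, base_damage):
--     total_damage = 0
--
--     for i in range(0, num_attacks):
--         if i == num_attacks - 1:
--             total_damage += base_damage * 4
--         else:
--             total_damage += base_damage * 2
--     return total_damage
-- ===== SOURCE B (Python) =====
-- def calculate_flurry_crit(num_attacks, base_damage):
--     # Closed form: n-1 attacks at 2x damage plus one final attack at 4x.
--     if num_attacks <= 0:
--         return 0
--     return base_damage * (2 * num_attacks + 2)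
-- ===== Notes on version B (the rewrite author's own statement) =====
-- stated objective: faster
-- what changed: Replaces the per-attack loop with the closed form base_damage*(2*num_attacks+2) (0 for num_attacks<=0).
import Mathlib
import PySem

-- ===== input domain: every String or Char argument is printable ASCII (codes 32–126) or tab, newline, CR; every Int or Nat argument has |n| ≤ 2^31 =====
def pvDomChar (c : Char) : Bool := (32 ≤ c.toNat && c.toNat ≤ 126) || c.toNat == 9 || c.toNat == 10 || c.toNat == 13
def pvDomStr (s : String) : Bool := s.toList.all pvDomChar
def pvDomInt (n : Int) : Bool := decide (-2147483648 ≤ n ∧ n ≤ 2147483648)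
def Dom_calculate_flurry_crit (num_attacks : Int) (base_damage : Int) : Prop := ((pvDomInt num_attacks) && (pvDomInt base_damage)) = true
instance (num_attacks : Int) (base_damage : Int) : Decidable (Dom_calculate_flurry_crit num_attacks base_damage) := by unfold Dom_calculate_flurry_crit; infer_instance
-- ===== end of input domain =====

-- B replaces the O(n) damage loop with the O(1) closed form base_damage*(2*num_attacks+2).


-- ===== PORT A =====
def calculate_flurry_crit (num_attacks : Int) (base_damage : Int) : Int :=
  (PySem.List.pyRange 0 num_attacks 1).foldl
    (fun total_damage i =>
      if i == num_attacks - 1 then total_damage + base_damage * 4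
      else total_damage + base_damage * 2) 0

-- ===== PORT B =====
-- B: closed form, no loop
def calculate_flurry_crit_alt (num_attacks : Int) (base_damage : Int) : Int :=
  if num_attacks ≤ 0 then 0 else base_damage * (2 * num_attacks + 2)

-- ===== PRECONDITION & SPEC =====
def Spec_calculate_flurry_crit (num_attacks : Int) (base_damage : Int) (out : Int) : Prop := out = calculate_flurry_crit_alt num_attacks base_damage
instance (num_attacks : Int) (base_damage : Int) (out : Int) : Decidable (Spec_calculate_flurry_crit num_attacks base_damage out) := by unfold Spec_calculate_flurry_crit; infer_instance

-- ===== CLAIM (what is proved, stated in full; the proofs are below) =====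
def Claim_equal_calculate_flurry_crit : Prop := ∀ (num_attacks : Int) (base_damage : Int), Dom_calculate_flurry_crit num_attacks base_damage → Spec_calculate_flurry_crit num_attacks base_damage (calculate_flurry_crit num_attacks base_damage)

-- ===== LEMMAS AND PROOFS =====

-- ===== VERDICT (by name: the statement is the Claim_ definition above) =====
theorem flurry_fold_const (n b : Int) : ∀ (l : List Int) (acc : Int),
    (∀ i ∈ l, i ≠ n - 1) →
    l.foldl (fun total i => if i == n - 1 then total + b * 4 else total + b * 2) acc
      = acc + b * 2 * l.length := by
  intro l
  induction l with
  | nil => intro acc _; simp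
  | cons x xs ih =>
      intro acc h
      have hx : (x == n - 1) = false := beq_eq_false_iff_ne.2 (h x (by simp))
      rw [List.foldl_cons, hx, if_neg (by simp)]
      rw [ih _ (fun i hi => h i (by simp [hi]))]
      simp only [List.length_cons]
      push_cast
      ring

theorem calculate_flurry_crit_spec : Claim_equal_calculate_flurry_crit := by
  intro n b _
  unfold Spec_calculate_flurry_crit calculate_flurry_crit calculate_flurry_crit_alt
  by_cases hn : n ≤ 0
  · rw [PySem.List.pyRange_one_eq_nil hn]
    simp [hn]
  · have hn' : 0 < n := by omega
    rw [PySem.List.pyRange_one_append 0 (n - 1) n (by omega) (by omega), List.foldl_append]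
    have hsing : PySem.List.pyRange (n - 1) n 1 = [n - 1] := by
      have h := PySem.List.pyRange_one_singleton (n - 1)
      rw [show n - 1 + 1 = n by ring] at h
      exact h
    rw [hsing]
    have hne : ∀ i ∈ PySem.List.pyRange 0 (n - 1) 1, i ≠ n - 1 := by
      intro i hi
      have := (PySem.List.mem_pyRange_one).1 hi
      omega
    rw [flurry_fold_const n b _ 0 hne, PySem.List.length_pyRange_one]
    have hcast : ((n - 1 - 0).toNat : Int) = n - 1 := by omega
    rw [hcast, List.foldl_cons, List.foldl_nil, if_pos (by simp), if_neg hn]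
    ring
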